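-- pv_equiv track=rewrite | github.com/aryanagarwal9/LogicTableauConstructor | tableau.py | isFormulaPredicate
-- ===== SOURCE A (Python) =====
-- VAR = ('x', 'y', 'z', 'w')
--
-- PRED = ('P', 'Q', 'R', 'S')
--
-- CONSTANTS = ('a', 'b', 'c', 'd', 'e', 'f', 'g', 'h', 'i', 'j')
--
-- def isFormulaPredicate(fmla):
--     for p in PRED:
--         for i in (CONSTANTS + VAR):
--             for j in (CONSTANTS + VAR):
--                 pred = p + '(' + i + ',' + j + ')'
--                 if fmla.find(pred) != -1:
--                     return True
--     return False
-- ===== SOURCE B (Python) =====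
-- PREDS = 'PQRS'
-- TERMS = 'abcdefghijxyzw'
--
-- def isFormulaPredicate(fmla):
--     for k in range(len(fmla)):
--         w = fmla[k:k+6]
--         if (len(w) == 6 and w[0] in PREDS and w[1] == '('
--                 and w[2] in TERMS and w[3] == ','
--                 and w[4] in TERMS and w[5] == ')'):
--             return True
--     return False
-- ===== Notes on version B (the rewrite author's own statement) =====
-- stated objective: faster
-- what changed: Replaced the generate-784-patterns-and-search loop nest with a single left-to-right scan that checks the 6-character predicate shape P(t,t) directly at each position.
import Mathlib
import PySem

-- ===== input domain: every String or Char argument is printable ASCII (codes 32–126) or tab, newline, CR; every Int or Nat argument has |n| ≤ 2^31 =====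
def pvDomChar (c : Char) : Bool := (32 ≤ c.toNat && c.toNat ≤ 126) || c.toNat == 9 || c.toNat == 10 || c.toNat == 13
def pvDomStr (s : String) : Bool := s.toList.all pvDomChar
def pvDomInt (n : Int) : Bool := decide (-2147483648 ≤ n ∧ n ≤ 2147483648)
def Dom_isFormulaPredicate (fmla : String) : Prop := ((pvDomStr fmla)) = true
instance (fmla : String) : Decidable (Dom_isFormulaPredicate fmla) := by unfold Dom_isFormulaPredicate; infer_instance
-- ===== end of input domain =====

-- B replaces A's search for each of the 784 generated patterns by one scan matching the shape directly (measurably faster by a constant factor).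

-- ===== PORT A =====
-- CONSTANTS + VAR, in A's iteration order
def pvTermStrs : List String :=
  ["a", "b", "c", "d", "e", "f", "g", "h", "i", "j", "x", "y", "z", "w"]

def pvPredStrs : List String := ["P", "Q", "R", "S"]

-- inner 'for j' loop: returns true on the early 'return True'
def pvLoopJ (fmla p i : String) : List String → Bool
  | [] => false
  | j :: js =>
    if PySem.Str.find fmla (p ++ "(" ++ i ++ "," ++ j ++ ")") ≠ -1 then true
    else pvLoopJ fmla p i js

-- middle 'for i' loop
def pvLoopI (fmla p : String) : List String → Bool
  | [] => false
  | i :: is => if pvLoopJ fmla p i pvTermStrs then true else pvLoopI fmla p is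

-- outer 'for p' loop
def pvLoopP (fmla : String) : List String → Bool
  | [] => false
  | p :: ps => if pvLoopI fmla p pvTermStrs then true else pvLoopP fmla ps

def isFormulaPredicate (fmla : String) : Bool := pvLoopP fmla pvPredStrs

-- ===== PORT B =====
def pvIsPred (c : Char) : Bool := ['P', 'Q', 'R', 'S'].contains c

def pvIsTerm (c : Char) : Bool :=
  ['a', 'b', 'c', 'd', 'e', 'f', 'g', 'h', 'i', 'j', 'x', 'y', 'z', 'w'].contains c

-- the body of Source B's loop: the 6-char window test (len(w)==6 and the six char checks)
def pvMatch6 : List Char → Bool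
  | [p, o, t1, c, t2, cl] =>
    pvIsPred p && (o == '(') && pvIsTerm t1 && (c == ',') && pvIsTerm t2 && (cl == ')')
  | _ => false

-- Source B's 'for k in range(len(s))' loop, one suffix per k
def pvScan : List Char → Bool
  | [] => false
  | c :: rest => pvMatch6 ((c :: rest).take 6) || pvScan rest

def isFormulaPredicate_alt (fmla : String) : Bool := pvScan fmla.toList

-- ===== PRECONDITION & SPEC =====
def Spec_isFormulaPredicate (fmla : String) (out : Bool) : Prop := out = isFormulaPredicate_alt fmla
instance (fmla : String) (out : Bool) : Decidable (Spec_isFormulaPredicate fmla out) := by unfold Spec_isFormulaPredicate; infer_instance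

-- ===== CLAIM (what is proved, stated in full; the proofs are below) =====
def Claim_equal_isFormulaPredicate : Prop := ∀ (fmla : String), Dom_isFormulaPredicate fmla → Spec_isFormulaPredicate fmla (isFormulaPredicate fmla)

-- ===== LEMMAS AND PROOFS =====

-- the common characterisation: the formula contains the 6-char shape p(t1,t2)
def pvShape (l : List Char) : Prop :=
  ∃ u cp ci cj v, l = u ++ cp :: '(' :: ci :: ',' :: cj :: ')' :: v ∧
    pvIsPred cp = true ∧ pvIsTerm ci = true ∧ pvIsTerm cj = true

theorem pred_chars {p : String} (h : p ∈ pvPredStrs) :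
    ∃ c, p.toList = [c] ∧ pvIsPred c = true := by
  simp [pvPredStrs] at h
  rcases h with rfl | rfl | rfl | rfl <;> exact ⟨_, rfl, by decide⟩

theorem term_chars {p : String} (h : p ∈ pvTermStrs) :
    ∃ c, p.toList = [c] ∧ pvIsTerm c = true := by
  simp [pvTermStrs] at h
  rcases h with rfl|rfl|rfl|rfl|rfl|rfl|rfl|rfl|rfl|rfl|rfl|rfl|rfl|rfl <;>
    exact ⟨_, rfl, by decide⟩

theorem pred_of_char {c : Char} (h : pvIsPred c = true) :
    ∃ p ∈ pvPredStrs, p.toList = [c] := by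
  simp [pvIsPred] at h
  rcases h with rfl | rfl | rfl | rfl <;>
    first
      | exact ⟨"P", by decide, by decide⟩
      | exact ⟨"Q", by decide, by decide⟩
      | exact ⟨"R", by decide, by decide⟩
      | exact ⟨"S", by decide, by decide⟩

theorem term_of_char {c : Char} (h : pvIsTerm c = true) :
    ∃ p ∈ pvTermStrs, p.toList = [c] := by
  simp [pvIsTerm] at h
  rcases h with rfl|rfl|rfl|rfl|rfl|rfl|rfl|rfl|rfl|rfl|rfl|rfl|rfl|rfl <;>
    first
      | exact ⟨"a", by decide, by decide⟩
      | exact ⟨"b", by decide, by decide⟩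
      | exact ⟨"c", by decide, by decide⟩
      | exact ⟨"d", by decide, by decide⟩
      | exact ⟨"e", by decide, by decide⟩
      | exact ⟨"f", by decide, by decide⟩
      | exact ⟨"g", by decide, by decide⟩
      | exact ⟨"h", by decide, by decide⟩
      | exact ⟨"i", by decide, by decide⟩
      | exact ⟨"j", by decide, by decide⟩
      | exact ⟨"x", by decide, by decide⟩
      | exact ⟨"y", by decide, by decide⟩
      | exact ⟨"z", by decide, by decide⟩
      | exact ⟨"w", by decide, by decide⟩

theorem loopJ_iff (fmla p i : String) (js : List String) :
    pvLoopJ fmla p i js = true ↔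
      ∃ j ∈ js, PySem.Str.find fmla (p ++ "(" ++ i ++ "," ++ j ++ ")") ≠ -1 := by
  induction js with
  | nil => simp [pvLoopJ]
  | cons j js ih =>
    simp only [pvLoopJ]
    split_ifs with h
    · exact iff_of_true rfl ⟨j, by simp, h⟩
    · rw [ih]
      constructor
      · rintro ⟨j', hm, hf⟩; exact ⟨j', List.mem_cons_of_mem _ hm, hf⟩
      · rintro ⟨j', hm, hf⟩
        rcases List.mem_cons.mp hm with rfl | hm
        · exact absurd hf h
        · exact ⟨j', hm, hf⟩

theorem loopI_iff (fmla p : String) (is : List String) :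
    pvLoopI fmla p is = true ↔ ∃ i ∈ is, pvLoopJ fmla p i pvTermStrs = true := by
  induction is with
  | nil => simp [pvLoopI]
  | cons i is ih =>
    simp only [pvLoopI]
    split_ifs with h
    · exact iff_of_true rfl ⟨i, by simp, h⟩
    · rw [ih]
      constructor
      · rintro ⟨x, hm, hf⟩; exact ⟨x, List.mem_cons_of_mem _ hm, hf⟩
      · rintro ⟨x, hm, hf⟩
        rcases List.mem_cons.mp hm with rfl | hm
        · exact absurd hf h
        · exact ⟨x, hm, hf⟩

theorem loopP_iff (fmla : String) (ps : List String) :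
    pvLoopP fmla ps = true ↔ ∃ p ∈ ps, pvLoopI fmla p pvTermStrs = true := by
  induction ps with
  | nil => simp [pvLoopP]
  | cons p ps ih =>
    simp only [pvLoopP]
    split_ifs with h
    · exact iff_of_true rfl ⟨p, by simp, h⟩
    · rw [ih]
      constructor
      · rintro ⟨x, hm, hf⟩; exact ⟨x, List.mem_cons_of_mem _ hm, hf⟩
      · rintro ⟨x, hm, hf⟩
        rcases List.mem_cons.mp hm with rfl | hm
        · exact absurd hf h
        · exact ⟨x, hm, hf⟩

theorem portA_iff (fmla : String) :
    isFormulaPredicate fmla = true ↔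
      ∃ p ∈ pvPredStrs, ∃ i ∈ pvTermStrs, ∃ j ∈ pvTermStrs,
        (p ++ "(" ++ i ++ "," ++ j ++ ")").toList <:+: fmla.toList := by
  unfold isFormulaPredicate
  rw [loopP_iff]
  refine exists_congr fun p => and_congr_right fun _ => ?_
  rw [loopI_iff]
  refine exists_congr fun i => and_congr_right fun _ => ?_
  rw [loopJ_iff]
  refine exists_congr fun j => and_congr_right fun _ => ?_
  exact PySem.Str.find_ne_neg_one_iff _ _

theorem portA_iff_shape (fmla : String) :
    isFormulaPredicate fmla = true ↔ pvShape fmla.toList := by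
  rw [portA_iff]
  constructor
  · rintro ⟨p, hp, i, hi, j, hj, hinf⟩
    obtain ⟨cp, hpc, hpp⟩ := pred_chars hp
    obtain ⟨ci, hic, hit⟩ := term_chars hi
    obtain ⟨cj, hjc, hjt⟩ := term_chars hj
    obtain ⟨u, v, huv⟩ := hinf
    refine ⟨u, cp, ci, cj, v, ?_, hpp, hit, hjt⟩
    rw [← huv]
    simp [String.toList_append, hpc, hic, hjc]
  · rintro ⟨u, cp, ci, cj, v, heq, hpp, hit, hjt⟩
    obtain ⟨p, hp, hpc⟩ := pred_of_char hpp
    obtain ⟨i, hi, hic⟩ := term_of_char hit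
    obtain ⟨j, hj, hjc⟩ := term_of_char hjt
    refine ⟨p, hp, i, hi, j, hj, u, v, ?_⟩
    rw [heq]
    simp [String.toList_append, hpc, hic, hjc]

theorem match6_iff (l : List Char) :
    pvMatch6 (l.take 6) = true ↔
      ∃ cp ci cj v, l = cp :: '(' :: ci :: ',' :: cj :: ')' :: v ∧
        pvIsPred cp = true ∧ pvIsTerm ci = true ∧ pvIsTerm cj = true := by
  obtain _ | ⟨a, _ | ⟨b, _ | ⟨c, _ | ⟨d, _ | ⟨e, _ | ⟨f, t⟩⟩⟩⟩⟩⟩ := l <;>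
    simp [pvMatch6] <;> try aesop

theorem scan_iff (l : List Char) : pvScan l = true ↔ pvShape l := by
  induction l with
  | nil =>
    simp only [pvScan, pvShape]
    constructor
    · intro h; cases h
    · rintro ⟨u, cp, ci, cj, v, h, -⟩
      have := congrArg List.length h
      simp at this
  | cons c rest ih =>
    simp only [pvScan, Bool.or_eq_true, ih, match6_iff]
    constructor
    · rintro (⟨cp, ci, cj, v, h, h1, h2, h3⟩ | ⟨u, cp, ci, cj, v, h, h1, h2, h3⟩)
      · exact ⟨[], cp, ci, cj, v, by simpa using h, h1, h2, h3⟩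
      · exact ⟨c :: u, cp, ci, cj, v, by simp [h], h1, h2, h3⟩
    · rintro ⟨u, cp, ci, cj, v, h, h1, h2, h3⟩
      cases u with
      | nil => exact Or.inl ⟨cp, ci, cj, v, by simpa using h, h1, h2, h3⟩
      | cons x u =>
        simp only [List.cons_append, List.cons.injEq] at h
        exact Or.inr ⟨u, cp, ci, cj, v, h.2, h1, h2, h3⟩

-- ===== VERDICT (by name: the statement is the Claim_ definition above) =====
theorem isFormulaPredicate_spec : Claim_equal_isFormulaPredicate := by
  intro fmla _
  unfold Spec_isFormulaPredicate isFormulaPredicate_alt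
  have hA := portA_iff_shape fmla
  have hB := scan_iff fmla.toList
  rcases h : pvScan fmla.toList with _ | _
  · rcases h2 : isFormulaPredicate fmla with _ | _
    · rfl
    · exact absurd (hB.mpr (hA.mp h2)) (by simp [h])
  · exact hA.mpr (hB.mp h)
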